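-- pv_equiv track=rewrite | github.com/ben-128/BaB-GameplayPatch | level_design/explore_level_design.py | search_level_keywords
-- ===== SOURCE A (Python) =====
-- def search_level_keywords(strings):
--     """Search for level-related keywords"""
--     keywords = [
--         'level', 'stage', 'map', 'dungeon', 'floor', 'zone', 'area',
--         'room', 'chamber', 'castle', 'town', 'village', 'forest',
--         'cave', 'mountain', 'temple', 'tower', 'gate', 'ruins',
--         'spawn', 'enemy', 'monster', 'boss', 'chest', 'treasure',
--         'door', 'portal', 'exit', 'entrance'
--     ]
--
--     results = {}
--     for keyword in keywords:
--         matches = [s for s in strings if keyword.lower() in s.lower()]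
--         if matches:
--             results[keyword] = matches
--
--     return results
-- ===== SOURCE B (Python) =====
-- def search_level_keywords(strings):
--     """Search for level-related keywords"""
--     keywords = [
--         'level', 'stage', 'map', 'dungeon', 'floor', 'zone', 'area',
--         'room', 'chamber', 'castle', 'town', 'village', 'forest',
--         'cave', 'mountain', 'temple', 'tower', 'gate', 'ruins',
--         'spawn', 'enemy', 'monster', 'boss', 'chest', 'treasure',
--         'door', 'portal', 'exit', 'entrance'
--     ]
--     kwset = set(keywords)
--     lengths = sorted({len(k) for k in keywords})
--
--     found = {kw: [] for kw in keywords}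
--     for s in strings:
--         low = s.lower()
--         n = len(low)
--         hits = set()
--         for i in range(n):
--             for L in lengths:
--                 if i + L <= n and low[i:i+L] in kwset:
--                     hits.add(low[i:i+L])
--         for kw in hits:
--             found[kw].append(s)
--
--     return {kw: found[kw] for kw in keywords if found[kw]}
-- ===== Notes on version B (the rewrite author's own statement) =====
-- stated objective: alternative
-- what changed: Instead of running a substring-containment test for every (keyword, string) pair, B enumerates each lowered string's substrings of the keyword lengths once and looks each up in a hash set of keywords, collecting the hit set per string, then assembles the result dict in keyword order.
import Mathlib
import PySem

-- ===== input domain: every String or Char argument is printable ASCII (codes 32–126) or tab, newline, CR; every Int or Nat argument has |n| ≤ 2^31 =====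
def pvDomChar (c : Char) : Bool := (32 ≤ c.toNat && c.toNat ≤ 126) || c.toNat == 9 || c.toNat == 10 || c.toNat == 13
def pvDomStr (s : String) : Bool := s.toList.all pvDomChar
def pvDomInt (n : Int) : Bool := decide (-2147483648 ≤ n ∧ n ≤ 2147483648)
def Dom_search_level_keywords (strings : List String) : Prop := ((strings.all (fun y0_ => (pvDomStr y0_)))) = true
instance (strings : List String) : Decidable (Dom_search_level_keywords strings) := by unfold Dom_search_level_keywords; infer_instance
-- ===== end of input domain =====

-- B replaces A's per-keyword substring searches by one pass that enumerates each lowered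
-- string's substrings of the keyword lengths and looks them up in a set of keywords
-- (alternative decomposition, same exact result).

def pvKeywords : List String :=
  ["level", "stage", "map", "dungeon", "floor", "zone", "area",
   "room", "chamber", "castle", "town", "village", "forest",
   "cave", "mountain", "temple", "tower", "gate", "ruins",
   "spawn", "enemy", "monster", "boss", "chest", "treasure",
   "door", "portal", "exit", "entrance"]

-- ===== PORT A =====
def search_level_keywords (strings : List String) : List (String × List String) :=
  (pvKeywords.foldl (fun results keyword =>
      let matchesA := strings.filter
        (fun s => PySem.Str.isIn (PySem.Str.lower keyword) (PySem.Str.lower s))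
      if matchesA ≠ [] then results.insert keyword matchesA else results)
    PySem.Dict.empty).items

-- ===== PORT B =====
-- kwset = set(keywords)
def pvKwSet : PySem.Set String := PySem.Set.ofList pvKeywords
-- lengths = sorted({len(k) for k in keywords})
def pvLengths : List Int :=
  PySem.List.sorted (PySem.Set.ofList (pvKeywords.map (fun k => PySem.Str.len k))) (fun x => x) false
-- hits: the distinct substrings of `low` whose length is a keyword length and that are keywords
def pvHits (low : String) : PySem.Set String :=
  let n := PySem.Str.len low
  (PySem.List.pyRange 0 n).foldl (fun hits i =>
    pvLengths.foldl (fun hits L =>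
      if i + L ≤ n ∧ PySem.Set.contains pvKwSet (PySem.Str.slice low (some i) (some (i + L))) = true
      then PySem.Set.add hits (PySem.Str.slice low (some i) (some (i + L)))
      else hits) hits) PySem.Set.empty

def search_level_keywords_alt (strings : List String) : List (String × List String) :=
  let found0 : PySem.Dict String (List String) :=
    pvKeywords.foldl (fun d kw => d.insert kw []) PySem.Dict.empty
  let found := strings.foldl (fun found s =>
      (pvHits (PySem.Str.lower s)).foldl (fun found kw => found.modify kw [] (· ++ [s])) found)
    found0
  (pvKeywords.foldl (fun results kw =>
      if found.getD kw [] ≠ [] then results.insert kw (found.getD kw []) else results)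
    PySem.Dict.empty).items

-- ===== PRECONDITION & SPEC =====
def Spec_search_level_keywords (strings : List String) (out : List (String × List String)) : Prop := out = search_level_keywords_alt strings
instance (strings : List String) (out : List (String × List String)) : Decidable (Spec_search_level_keywords strings out) := by unfold Spec_search_level_keywords; infer_instance

-- ===== CLAIM (what is proved, stated in full; the proofs are below) =====
def Claim_equal_search_level_keywords : Prop := ∀ (strings : List String), Dom_search_level_keywords strings → Spec_search_level_keywords strings (search_level_keywords strings)

-- ===== LEMMAS AND PROOFS =====

lemma pvKeywords_lower : ∀ kw ∈ pvKeywords, PySem.Str.lower kw = kw := by decide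

lemma pvKeywords_len : ∀ kw ∈ pvKeywords, PySem.Str.len kw ∈ pvLengths := by decide

lemma pvKeywords_ne_nil : ∀ kw ∈ pvKeywords, kw.toList ≠ [] := by decide

-- membership after the inner (lengths) fold
lemma mem_inner_fold (low : String) (n i : Int) (x : String) :
    ∀ (Ls : List Int) (h0 : PySem.Set String),
      x ∈ Ls.foldl (fun hits L =>
          if i + L ≤ n ∧ PySem.Set.contains pvKwSet (PySem.Str.slice low (some i) (some (i + L))) = true
          then PySem.Set.add hits (PySem.Str.slice low (some i) (some (i + L)))
          else hits) h0
      ↔ x ∈ h0 ∨ ∃ L ∈ Ls, (i + L ≤ n ∧ PySem.Set.contains pvKwSet (PySem.Str.slice low (some i) (some (i + L))) = true)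
            ∧ x = PySem.Str.slice low (some i) (some (i + L)) := by
  intro Ls
  induction Ls with
  | nil => simp
  | cons L rest ih =>
    intro h0
    simp only [List.foldl_cons]
    rw [ih]
    by_cases hc : i + L ≤ n ∧ PySem.Set.contains pvKwSet (PySem.Str.slice low (some i) (some (i + L))) = true
    · rw [if_pos hc, PySem.Set.mem_add]
      constructor
      · rintro (⟨hx | hx⟩ | ⟨L', hL', hc', hx⟩)
        · exact Or.inl hx
        · exact Or.inr ⟨L, List.mem_cons_self, hc, hx⟩
        · exact Or.inr ⟨L', List.mem_cons_of_mem _ hL', hc', hx⟩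
      · rintro (hx | ⟨L', hL', hc', hx⟩)
        · exact Or.inl (Or.inl hx)
        · rcases List.mem_cons.mp hL' with h | h
          · subst h; exact Or.inl (Or.inr hx)
          · exact Or.inr ⟨L', h, hc', hx⟩
    · rw [if_neg hc]
      constructor
      · rintro (hx | ⟨L', hL', hc', hx⟩)
        · exact Or.inl hx
        · exact Or.inr ⟨L', List.mem_cons_of_mem _ hL', hc', hx⟩
      · rintro (hx | ⟨L', hL', hc', hx⟩)
        · exact Or.inl hx
        · rcases List.mem_cons.mp hL' with h | h
          · exact absurd (h ▸ hc') hc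
          · exact Or.inr ⟨L', h, hc', hx⟩

-- membership after the outer (positions) fold
lemma mem_outer_fold (low : String) (n : Int) (x : String) :
    ∀ (is : List Int) (h0 : PySem.Set String),
      x ∈ is.foldl (fun hits i =>
          pvLengths.foldl (fun hits L =>
            if i + L ≤ n ∧ PySem.Set.contains pvKwSet (PySem.Str.slice low (some i) (some (i + L))) = true
            then PySem.Set.add hits (PySem.Str.slice low (some i) (some (i + L)))
            else hits) hits) h0
      ↔ x ∈ h0 ∨ ∃ i ∈ is, ∃ L ∈ pvLengths,
          (i + L ≤ n ∧ PySem.Set.contains pvKwSet (PySem.Str.slice low (some i) (some (i + L))) = true)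
          ∧ x = PySem.Str.slice low (some i) (some (i + L)) := by
  intro is
  induction is with
  | nil => simp
  | cons i rest ih =>
    intro h0
    simp only [List.foldl_cons]
    rw [ih, mem_inner_fold]
    constructor
    · rintro (⟨hx | ⟨L, hL, hc, hx⟩⟩ | ⟨i', hi', rest'⟩)
      · exact Or.inl hx
      · exact Or.inr ⟨i, List.mem_cons_self, L, hL, hc, hx⟩
      · exact Or.inr ⟨i', List.mem_cons_of_mem _ hi', rest'⟩
    · rintro (hx | ⟨i', hi', L, hL, hc, hx⟩)
      · exact Or.inl (Or.inl hx)
      · rcases List.mem_cons.mp hi' with h | h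
        · subst h; exact Or.inl (Or.inr ⟨L, hL, hc, hx⟩)
        · exact Or.inr ⟨i', h, L, hL, hc, hx⟩

-- membership in pvHits
lemma mem_pvHits (low : String) (x : String) :
    x ∈ pvHits low
    ↔ ∃ i ∈ PySem.List.pyRange 0 (PySem.Str.len low), ∃ L ∈ pvLengths,
        (i + L ≤ PySem.Str.len low ∧ PySem.Set.contains pvKwSet (PySem.Str.slice low (some i) (some (i + L))) = true)
        ∧ x = PySem.Str.slice low (some i) (some (i + L)) := by
  unfold pvHits
  simp only []
  rw [mem_outer_fold]
  simp [PySem.Set.empty]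

-- the inner fold preserves Nodup
lemma nodup_inner_fold (low : String) (n i : Int) :
    ∀ (Ls : List Int) (h0 : PySem.Set String), h0.Nodup →
      (Ls.foldl (fun hits L =>
          if i + L ≤ n ∧ PySem.Set.contains pvKwSet (PySem.Str.slice low (some i) (some (i + L))) = true
          then PySem.Set.add hits (PySem.Str.slice low (some i) (some (i + L)))
          else hits) h0).Nodup := by
  intro Ls
  induction Ls with
  | nil => intro h0 h; simpa using h
  | cons L rest ih =>
    intro h0 h
    simp only [List.foldl_cons]
    apply ih
    split_ifs with hc
    · exact PySem.Set.nodup_add _ _ h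
    · exact h

-- pvHits is duplicate-free
lemma nodup_pvHits (low : String) : (pvHits low).Nodup := by
  unfold pvHits
  simp only []
  generalize PySem.List.pyRange 0 (PySem.Str.len low) = is
  have : ∀ (is : List Int) (h0 : PySem.Set String), h0.Nodup →
      (is.foldl (fun hits i =>
        pvLengths.foldl (fun hits L =>
          if i + L ≤ PySem.Str.len low ∧ PySem.Set.contains pvKwSet (PySem.Str.slice low (some i) (some (i + L))) = true
          then PySem.Set.add hits (PySem.Str.slice low (some i) (some (i + L)))
          else hits) hits) h0).Nodup := by
    intro is
    induction is with
    | nil => intro h0 h; simpa using h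
    | cons i rest ih =>
      intro h0 h
      simp only [List.foldl_cons]
      exact ih _ (nodup_inner_fold low _ i pvLengths h0 h)
  exact this is PySem.Set.empty (by simp [PySem.Set.empty])

lemma pvLengths_nonneg : ∀ L ∈ pvLengths, 0 ≤ L := by decide

-- semantic core: for a keyword, membership in pvHits is exactly Python's `kw in low`
lemma mem_pvHits_iff_isIn (kw low : String) (hkw : kw ∈ pvKeywords) :
    kw ∈ pvHits low ↔ PySem.Str.isIn kw low = true := by
  rw [mem_pvHits, PySem.Str.isIn_iff_infix]
  constructor
  · rintro ⟨i, hi, L, hL, ⟨hle, _⟩, hx⟩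
    obtain ⟨hi0, _⟩ := PySem.List.mem_pyRange_one.mp hi
    have hL0 := pvLengths_nonneg L hL
    have hkwl : kw.toList = (low.toList.drop i.toNat).take L.toNat := by
      rw [hx]
      have : (PySem.Str.slice low (some i) (some (i + L))).toList
          = PySem.List.slice low.toList (some i) (some (i + L)) := by
        simp [PySem.Str.toList_slice]
      rw [this]
      have hi' : i = ((i.toNat : Nat) : Int) := (Int.toNat_of_nonneg hi0).symm
      have hL' : L = ((L.toNat : Nat) : Int) := (Int.toNat_of_nonneg hL0).symm
      conv_lhs => rw [hi', hL']
      rw [PySem.List.slice_natCast_add]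
    rw [hkwl]
    exact (List.take_prefix _ _).isInfix.trans (List.drop_suffix _ _).isInfix
  · intro hin
    obtain ⟨pre, post, heq⟩ := hin
    have hlen : low.toList.length = pre.length + kw.toList.length + post.length := by
      rw [← heq]; simp; omega
    have hkwpos : 0 < kw.toList.length :=
      List.length_pos_of_ne_nil (pvKeywords_ne_nil kw hkw)
    have hslice : PySem.Str.slice low (some (pre.length : Int))
        (some ((pre.length : Int) + (kw.toList.length : Int))) = kw := by
      apply String.toList_inj.mp
      have : (PySem.Str.slice low (some (pre.length : Int))
          (some ((pre.length : Int) + (kw.toList.length : Int)))).toList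
          = PySem.List.slice low.toList (some (pre.length : Int)) (some ((pre.length : Int) + (kw.toList.length : Int))) := by
        simp [PySem.Str.toList_slice]
      rw [this, PySem.List.slice_natCast_add, ← heq, List.append_assoc,
        List.drop_left, List.take_left]
    refine ⟨(pre.length : Int), ?_, (kw.toList.length : Int), ?_, ⟨?_, ?_⟩, ?_⟩
    · rw [PySem.List.mem_pyRange_one, PySem.Str.len_eq]
      constructor
      · positivity
      · rw [hlen]; push_cast; omega
    · have := pvKeywords_len kw hkw
      rwa [PySem.Str.len_eq] at this
    · rw [PySem.Str.len_eq, hlen]; push_cast; omega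
    · rw [hslice]
      exact (PySem.Set.contains_iff _ _).mpr ((PySem.Set.mem_ofList _ _).mpr hkw)
    · rw [hslice]

-- one string's hits fold, read at key k
lemma hits_fold_getD (s : String) (k : String) :
    ∀ (hs : List String) (d : PySem.Dict String (List String)), hs.Nodup →
      (hs.foldl (fun d kw => d.modify kw [] (· ++ [s])) d).getD k []
      = if k ∈ hs then d.getD k [] ++ [s] else d.getD k [] := by
  intro hs
  induction hs with
  | nil => simp
  | cons kw rest ih =>
    intro d hnd
    have hkr : kw ∉ rest := (List.nodup_cons.mp hnd).1
    simp only [List.foldl_cons]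
    rw [ih _ (List.Nodup.of_cons hnd)]
    by_cases hk : k = kw
    · subst hk
      rw [if_neg hkr, if_pos List.mem_cons_self, PySem.Dict.getD_modify_self]
    · rw [PySem.Dict.getD_modify]
      simp only [hk, if_false, List.mem_cons, false_or]

-- the whole string pass, read at a key
lemma pass_getD (k : String) :
    ∀ (strings : List String) (d : PySem.Dict String (List String)),
      (strings.foldl (fun found s =>
          (pvHits (PySem.Str.lower s)).foldl (fun found kw => found.modify kw [] (· ++ [s])) found) d).getD k []
      = d.getD k [] ++ strings.filter (fun s => decide (k ∈ pvHits (PySem.Str.lower s))) := by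
  intro strings
  induction strings with
  | nil => simp
  | cons s rest ih =>
    intro d
    simp only [List.foldl_cons]
    rw [ih, hits_fold_getD s k _ _ (nodup_pvHits _), List.filter_cons]
    by_cases hin : k ∈ pvHits (PySem.Str.lower s)
    · simp [hin, List.append_assoc]
    · simp [hin]

-- the initial all-empty accumulator reads [] at every key
lemma init_getD (k : String) :
    ∀ (kws : List String) (d : PySem.Dict String (List String)), d.getD k [] = [] →
      (kws.foldl (fun d kw => d.insert kw ([] : List String)) d).getD k [] = [] := by
  intro kws
  induction kws with
  | nil => intro d h; simpa using h
  | cons kw rest ih =>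
    intro d h
    simp only [List.foldl_cons]
    apply ih
    by_cases hk : k = kw
    · subst hk; simp [PySem.Dict.getD_insert_self]
    · rw [PySem.Dict.getD_insert_of_ne]; exact h; exact hk

-- ===== VERDICT (by name: the statement is the Claim_ definition above) =====
theorem search_level_keywords_spec : Claim_equal_search_level_keywords := by
  intro strings _
  unfold Spec_search_level_keywords search_level_keywords search_level_keywords_alt
  congr 1
  apply PySem.List.foldl_congr_mem'
  intro kw hkw res
  have hacc :
      (strings.foldl (fun found s =>
          (pvHits (PySem.Str.lower s)).foldl (fun found kw => found.modify kw [] (· ++ [s])) found)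
        (pvKeywords.foldl (fun d kw => d.insert kw []) PySem.Dict.empty)).getD kw []
      = strings.filter (fun s => PySem.Str.isIn kw (PySem.Str.lower s)) := by
    rw [pass_getD kw strings _, init_getD kw pvKeywords PySem.Dict.empty (by simp), List.nil_append]
    apply List.filter_congr
    intro s _
    simp only [mem_pvHits_iff_isIn kw (PySem.Str.lower s) hkw]
    cases PySem.Str.isIn kw (PySem.Str.lower s) <;> simp
  simp only [hacc, pvKeywords_lower kw hkw]
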